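-- pv_equiv track=rewrite | github.com/Libensemble/libensemble | libensemble/resources/resources.py | map_workerid_to_index
-- ===== SOURCE A (Python) =====
-- class ResourcesException(Exception):
--     "Resources module exception."
--
-- def map_workerid_to_index(num_workers, workerID, zero_resource_list):
--     """Map WorkerID to index into a nodelist"""
--     index = workerID - 1
--     if zero_resource_list:
--         for i in range(1, num_workers+1):
--             if i in zero_resource_list:
--                 index -= 1
--             if index < i:
--                 return index
--         raise ResourcesException("Error mapping workerID {} to nodelist index {}".format(workerID, index))
--     return index
-- ===== SOURCE B (Python) =====
-- class ResourcesException(Exception):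
--     "Resources module exception."
--
-- def map_workerid_to_index(num_workers, workerID, zero_resource_list):
--     """Map WorkerID to index into a nodelist (segment scan over the sorted
--     distinct in-range zero-resource ids instead of a scan over all workers)."""
--     if not zero_resource_list:
--         return workerID - 1
--     zs = sorted({z for z in zero_resource_list if 1 <= z <= num_workers})
--     k = 0
--     start = 1
--     for z in zs:
--         # workers in [start, z-1] all have k zero-resource workers before them
--         if start <= z - 1 and workerID - k <= z - 1:
--             return workerID - 1 - k
--         k += 1
--         start = z
--     if start <= num_workers and workerID - k <= num_workers:
--         return workerID - 1 - k
--     raise ResourcesException(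
--         "Error mapping workerID {} to nodelist index {}".format(workerID, workerID - 1 - k)
--     )
-- ===== Notes on version B (the rewrite author's own statement) =====
-- stated objective: faster
-- what changed: B replaces A's scan over every worker id 1..num_workers with a membership test per id by a single pass over the sorted distinct in-range zero-resource ids, treating each gap between consecutive zero-resource ids as one segment with a constant offset.
import Mathlib
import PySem

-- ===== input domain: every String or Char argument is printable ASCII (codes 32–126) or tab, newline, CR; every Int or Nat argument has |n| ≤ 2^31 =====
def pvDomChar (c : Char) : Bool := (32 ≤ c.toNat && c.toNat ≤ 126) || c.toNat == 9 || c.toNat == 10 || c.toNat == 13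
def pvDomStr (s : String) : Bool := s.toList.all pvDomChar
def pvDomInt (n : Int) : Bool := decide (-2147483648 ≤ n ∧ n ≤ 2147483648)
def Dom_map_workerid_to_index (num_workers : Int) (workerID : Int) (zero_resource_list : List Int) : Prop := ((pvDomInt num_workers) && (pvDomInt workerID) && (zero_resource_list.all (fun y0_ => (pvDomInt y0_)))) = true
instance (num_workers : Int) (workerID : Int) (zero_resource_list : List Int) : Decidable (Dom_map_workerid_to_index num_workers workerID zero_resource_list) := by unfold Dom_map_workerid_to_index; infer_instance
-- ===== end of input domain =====

-- B replaces A's per-worker scan (membership test for every id 1..num_workers) by one pass over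
-- the sorted distinct in-range zero-resource ids, handling each gap between them as a segment.

-- ===== PORT A =====
-- the loop 'for i in range(1, num_workers+1)', generated lazily like Python's range: fuel =
-- the number of remaining iterations, i the current id; none = the loop falls through (Python raises)
def mapALoop (zero_resource_list : List Int) (index : Int) (i : Int) (fuel : Nat) : Option Int :=
  match fuel with
  | 0 => none
  | Nat.succ f =>
    let index' := if zero_resource_list.contains i then index - 1 else index
    if index' < i then some index' else mapALoop zero_resource_list index' (i + 1) f

def map_workerid_to_index (num_workers : Int) (workerID : Int) (zero_resource_list : List Int) : Int :=
  let index := workerID - 1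
  if zero_resource_list ≠ [] then
    -- range(1, num_workers+1) has max(0, num_workers) = num_workers.toNat elements, starting at 1
    match mapALoop zero_resource_list index 1 num_workers.toNat with
    | some v => v
    | none => 0  -- Python raises ResourcesException here; excluded by Pre_
  else index

-- ===== PORT B =====
-- the loop 'for z in zs' of Source B; none = fall-through (Python raises)
def altLoop (num_workers : Int) (workerID : Int) (zs : List Int) (k : Int) (start : Int) : Option Int :=
  match zs with
  | [] =>
    if start ≤ num_workers ∧ workerID - k ≤ num_workers then some (workerID - 1 - k) else none
  | z :: rest =>
    if start ≤ z - 1 ∧ workerID - k ≤ z - 1 then some (workerID - 1 - k)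
    else altLoop num_workers workerID rest (k + 1) z

def map_workerid_to_index_alt (num_workers : Int) (workerID : Int) (zero_resource_list : List Int) : Int :=
  if zero_resource_list = [] then workerID - 1
  else
    let zs := PySem.List.sorted (PySem.Set.ofList (zero_resource_list.filter (fun z => decide (1 ≤ z ∧ z ≤ num_workers)))) (fun x => x) false
    match altLoop num_workers workerID zs 0 1 with
    | some v => v
    | none => 0  -- Python raises ResourcesException here; excluded by Pre_

-- ===== PRECONDITION & SPEC =====
-- Pre_ excludes exactly the inputs on which A raises ResourcesException (nonempty
-- zero_resource_list whose loop over 1..num_workers falls through); B raises there too.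
def Pre_map_workerid_to_index (num_workers : Int) (workerID : Int) (zero_resource_list : List Int) : Prop :=
  zero_resource_list = [] ∨
    (1 ≤ num_workers ∧
      workerID ≤ num_workers + ((PySem.List.dedup (zero_resource_list.filter (fun z => decide (1 ≤ z ∧ z ≤ num_workers)))).length : Int))

instance (num_workers : Int) (workerID : Int) (zero_resource_list : List Int) : Decidable (Pre_map_workerid_to_index num_workers workerID zero_resource_list) := by unfold Pre_map_workerid_to_index; infer_instance

def pvWitness_map_workerid_to_index : Int × Int × List Int := (3, 2, [1])

def Spec_map_workerid_to_index (num_workers : Int) (workerID : Int) (zero_resource_list : List Int) (out : Int) : Prop := out = map_workerid_to_index_alt num_workers workerID zero_resource_list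
instance (num_workers : Int) (workerID : Int) (zero_resource_list : List Int) (out : Int) : Decidable (Spec_map_workerid_to_index num_workers workerID zero_resource_list out) := by unfold Spec_map_workerid_to_index; infer_instance

-- ===== CLAIM (what is proved, stated in full; the proofs are below) =====
def Claim_equal_map_workerid_to_index : Prop := ∀ (num_workers : Int) (workerID : Int) (zero_resource_list : List Int), Dom_map_workerid_to_index num_workers workerID zero_resource_list → Pre_map_workerid_to_index num_workers workerID zero_resource_list → Spec_map_workerid_to_index num_workers workerID zero_resource_list (map_workerid_to_index num_workers workerID zero_resource_list)

-- ===== LEMMAS AND PROOFS =====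

-- proof-only helper: A's loop phrased over an explicit list of ids
def mapASeq (zero_resource_list : List Int) (is_ : List Int) (index : Int) : Option Int :=
  match is_ with
  | [] => none
  | i :: rest =>
    let index' := if zero_resource_list.contains i then index - 1 else index
    if index' < i then some index' else mapASeq zero_resource_list rest index'

-- the fuel loop of port A runs over exactly the ids a, a+1, …, a+n-1
lemma mapALoop_eq_mapASeq (zrl : List Int) :
    ∀ (n : Nat) (a idx : Int),
      mapALoop zrl idx a n = mapASeq zrl (PySem.List.pyRange a (a + n) 1) idx := by
  intro n
  induction n with
  | zero =>
    intro a idx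
    rw [PySem.List.pyRange_one_eq_nil (by omega)]
    rfl
  | succ f ih =>
    intro a idx
    rw [PySem.List.pyRange_one_cons (by omega)]
    simp only [mapALoop, mapASeq]
    split_ifs <;> first | rfl | (rw [ih]; congr 2; omega)

-- A's loop over a zero-free stretch of ids keeps index constant and returns iff some id exceeds it
lemma mapASeq_run (zrl l2 : List Int) :
    ∀ (n : Nat) (a b idx : Int), (b - a).toNat = n →
      (∀ i : Int, a ≤ i → i < b → zrl.contains i = false) →
      mapASeq zrl (PySem.List.pyRange a b 1 ++ l2) idx =
        if a < b ∧ idx < b - 1 then some idx else mapASeq zrl l2 idx := by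
  intro n
  induction n with
  | zero =>
    intro a b idx hn _
    rw [PySem.List.pyRange_one_eq_nil (by omega)]
    simp only [List.nil_append]
    rw [if_neg (by omega)]
  | succ m ih =>
    intro a b idx hn hz
    have hab : a < b := by omega
    rw [PySem.List.pyRange_one_cons hab]
    simp only [List.cons_append, mapASeq, hz a le_rfl hab, Bool.false_eq_true, if_false]
    by_cases hlt : idx < a
    · rw [if_pos hlt, if_pos (by constructor <;> omega)]
    · rw [if_neg hlt, ih (a + 1) b idx (by omega) (fun i h1 h2 => hz i (by omega) h2)]
      split_ifs with h1 h2 h2 <;> first | rfl | omega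

-- B's segment loop started at z+1 (after A separately checks id z) equals it started at z
lemma altLoop_start (num workerID : Int) (rest : List Int) (k z : Int)
    (hz : z ≤ num) (hrest : ∀ y ∈ rest, z < y ∧ y ≤ num) :
    (if workerID - 1 - (k + 1) < z then some (workerID - 1 - (k + 1))
     else altLoop num workerID rest (k + 1) (z + 1))
      = altLoop num workerID rest (k + 1) z := by
  cases rest with
  | nil =>
    simp only [altLoop]
    split_ifs <;> first | rfl | omega
  | cons z' rest' =>
    have hz' := hrest z' (by simp)
    simp only [altLoop]
    split_ifs <;> first | rfl | omega

-- main invariant: A's loop from id a with k zero-resource ids already skipped equals B's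
-- segment loop over the sorted distinct zero-resource ids in [a, num]
lemma mapASeq_eq_altLoop (zrl : List Int) (num workerID : Int) :
    ∀ (zs : List Int) (a k : Int),
      zs.Pairwise (· < ·) →
      (∀ z : Int, z ∈ zs ↔ (zrl.contains z = true ∧ a ≤ z ∧ z ≤ num)) →
      mapASeq zrl (PySem.List.pyRange a (num + 1) 1) (workerID - 1 - k)
        = altLoop num workerID zs k a := by
  intro zs
  induction zs with
  | nil =>
    intro a k _ hmem
    rw [← List.append_nil (PySem.List.pyRange a (num + 1) 1)]
    rw [mapASeq_run zrl [] (num + 1 - a).toNat a (num + 1) _ rfl ?_]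
    · simp only [mapASeq, altLoop]
      split_ifs <;> first | rfl | omega
    · intro i h1 h2
      by_contra hc
      have : i ∈ ([] : List Int) := (hmem i).mpr ⟨by simpa using hc, h1, by omega⟩
      simp at this
  | cons z rest ih =>
    intro a k hpw hmem
    have hzfacts := (hmem z).mp (by simp)
    obtain ⟨hzc, haz, hznum⟩ := hzfacts
    have hrest_lt : ∀ y ∈ rest, z < y := by
      intro y hy; exact (List.pairwise_cons.mp hpw).1 y hy
    rw [PySem.List.pyRange_one_append a z (num + 1) haz (by omega)]
    rw [mapASeq_run zrl _ (z - a).toNat a z _ rfl ?_]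
    · simp only [altLoop]
      split_ifs with h1 h2 h2
      · rfl
      · omega
      · omega
      · -- continue past the zero-free stretch; A now checks id z itself
        rw [PySem.List.pyRange_one_cons (by omega)]
        simp only [mapASeq, hzc, if_true]
        have hidx : workerID - 1 - k - 1 = workerID - 1 - (k + 1) := by ring
        rw [hidx]
        rw [ih (z + 1) (k + 1) (List.pairwise_cons.mp hpw).2 ?_]
        · exact altLoop_start num workerID rest k z hznum
            (fun y hy => ⟨hrest_lt y hy, ((hmem y).mp (by simp [hy])).2.2⟩)
        · intro y
          constructor
          · intro hy
            have := (hmem y).mp (by simp [hy])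
            exact ⟨this.1, by have := hrest_lt y hy; omega, this.2.2⟩
          · intro ⟨hc, h1, h2⟩
            have : y ∈ z :: rest := (hmem y).mpr ⟨hc, by omega, h2⟩
            cases this with
            | head => omega
            | tail _ h => exact h
    · intro i h1 h2
      by_contra hc
      have hi : i ∈ z :: rest := (hmem i).mpr ⟨by simpa using hc, h1, by omega⟩
      cases hi with
      | head => omega
      | tail _ h => exact absurd (hrest_lt i h) (by omega)

-- ===== VERDICT (by name: the statement is the Claim_ definition above) =====
theorem map_workerid_to_index_spec : Claim_equal_map_workerid_to_index := by
  intro num_workers workerID zrl _hdom _hpre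
  unfold Spec_map_workerid_to_index map_workerid_to_index map_workerid_to_index_alt
  by_cases hnil : zrl = []
  · simp [hnil]
  · rw [if_pos hnil, if_neg hnil]
    have hmain := mapASeq_eq_altLoop zrl num_workers workerID
      (PySem.List.sorted (PySem.Set.ofList (zrl.filter (fun z => decide (1 ≤ z ∧ z ≤ num_workers)))) (fun x => x) false)
      1 0
      (PySem.List.sorted_ofList_pairwise_lt _)
      ?_
    · have h0 : workerID - 1 - 0 = workerID - 1 := by ring
      rw [h0] at hmain
      have hr : PySem.List.pyRange 1 (1 + (num_workers.toNat : Int)) 1 = PySem.List.pyRange 1 (num_workers + 1) 1 := by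
        by_cases h : 0 ≤ num_workers
        · congr 1
          omega
        · rw [PySem.List.pyRange_one_eq_nil (by omega), PySem.List.pyRange_one_eq_nil (by omega)]
      rw [mapALoop_eq_mapASeq zrl num_workers.toNat 1 (workerID - 1), hr, hmain]
    · intro z
      rw [PySem.List.mem_sorted, PySem.Set.mem_ofList, List.mem_filter]
      simp
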